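-- pv_equiv track=rewrite | github.com/leo-editor/leo-editor | leoStandAloneGlobals.py | computeWidth
-- ===== SOURCE A (Python) =====
-- def computeWidth (s, tab_width):
--
--     w = 0
--     for ch in s:
--         if ch == '\t':
--             w += (abs(tab_width) - (w % abs(tab_width)))
--         elif ch == '\n': # Bug fix: 2012/06/05.
--             break
--         else:
--             w += 1
--     return w
-- ===== SOURCE B (Python) =====
-- def computeWidth(s, tab_width):
--     line = s.split('\n', 1)[0]
--     pieces = line.split('\t')
--     a = abs(tab_width)
--     w = len(pieces[0])
--     for piece in pieces[1:]:
--         w += a - (w % a)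
--         w += len(piece)
--     return w
-- ===== Notes on version B (the rewrite author's own statement) =====
-- stated objective: faster
-- what changed: B truncates at the first newline with split('\n',1)[0], splits the line on tabs, and folds over the tab-separated segments (advancing to the next tab stop between segments), replacing A's per-character Python loop with C-level split/len operations.
-- outside the precondition, e.g. on computeWidth('x\ty', 0): A raises ZeroDivisionError, B raises ZeroDivisionError
import Mathlib
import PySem

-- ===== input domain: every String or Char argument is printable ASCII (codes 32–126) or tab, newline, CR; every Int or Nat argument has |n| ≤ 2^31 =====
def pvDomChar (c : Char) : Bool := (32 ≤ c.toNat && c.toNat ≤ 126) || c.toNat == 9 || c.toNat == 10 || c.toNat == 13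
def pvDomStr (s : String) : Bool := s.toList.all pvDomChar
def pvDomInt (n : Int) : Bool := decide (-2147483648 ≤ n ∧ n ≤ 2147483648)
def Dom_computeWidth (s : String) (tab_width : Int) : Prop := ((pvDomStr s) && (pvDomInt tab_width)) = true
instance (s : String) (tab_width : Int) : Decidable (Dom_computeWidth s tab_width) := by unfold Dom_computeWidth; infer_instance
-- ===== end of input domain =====

-- B replaces A's per-character loop (with break) by truncating at the first newline and
-- folding over tab-separated segments; same O(n) asymptotics, measurably faster constants in Python.


-- ===== PORT A =====
-- the for-loop with break, one char at a time; Python's `%` is PySem.Int.mod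
def pvGoA (tab_width : Int) : List Char → Int → Int
  | [], w => w
  | c :: rest, w =>
    if c = '\t' then pvGoA tab_width rest (w + (|tab_width| - PySem.Int.mod w |tab_width|))
    else if c = '\n' then w
    else pvGoA tab_width rest (w + 1)

def computeWidth (s : String) (tab_width : Int) : Int := pvGoA tab_width s.toList 0

-- ===== PORT B =====
-- hand port of line.split('\t') on a list of chars: exact (no empty separator, no maxsplit)
def pvSplitTabs : List Char → List (List Char)
  | [] => [[]]
  | c :: rest =>
    let r := pvSplitTabs rest
    if c = '\t' then [] :: r else (c :: r.headD []) :: r.tail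

-- the for-loop over pieces[1:] with accumulator w
def pvFoldPieces (a : Int) (ps : List (List Char)) (w : Int) : Int :=
  ps.foldl (fun w p => (w + (a - PySem.Int.mod w a)) + (p.length : Int)) w

def computeWidth_alt (s : String) (tab_width : Int) : Int :=
  -- s.split('\n', 1)[0] = the prefix of s before the first newline: exact
  let line := s.toList.takeWhile (fun c => c ≠ '\n')
  let pieces := pvSplitTabs line
  pvFoldPieces |tab_width| pieces.tail ((pieces.headD []).length : Int)

-- ===== PRECONDITION & SPEC =====
-- Pre_ excludes exactly the inputs where Python A raises ZeroDivisionError: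
-- tab_width == 0 with a '\t' before the first newline (B raises there too).
def Pre_computeWidth (s : String) (tab_width : Int) : Prop :=
  tab_width ≠ 0 ∨ '\t' ∉ s.toList.takeWhile (fun c => c ≠ '\n')
instance (s : String) (tab_width : Int) : Decidable (Pre_computeWidth s tab_width) := by
  unfold Pre_computeWidth; infer_instance
def pvWitness_computeWidth : String × Int := ("ab\tcd\ne", 4)

def Spec_computeWidth (s : String) (tab_width : Int) (out : Int) : Prop := out = computeWidth_alt s tab_width
instance (s : String) (tab_width : Int) (out : Int) : Decidable (Spec_computeWidth s tab_width out) := by unfold Spec_computeWidth; infer_instance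

-- ===== CLAIM (what is proved, stated in full; the proofs are below) =====
def Claim_equal_computeWidth : Prop := ∀ (s : String) (tab_width : Int), Dom_computeWidth s tab_width → Pre_computeWidth s tab_width → Spec_computeWidth s tab_width (computeWidth s tab_width)

-- ===== LEMMAS AND PROOFS =====

theorem pvSplitTabs_ne_nil (l : List Char) : pvSplitTabs l ≠ [] := by
  cases l with
  | nil => simp [pvSplitTabs]
  | cons c rest => simp only [pvSplitTabs]; split <;> simp

-- loop invariant: A's char loop from accumulator w equals B's fold over the split of the
-- remaining line, with the first piece's length folded into the start value
theorem pvGoA_eq (t : Int) (l : List Char) (w : Int) :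
    pvGoA t l w =
      pvFoldPieces |t| (pvSplitTabs (l.takeWhile (fun c => c ≠ '\n'))).tail
        (w + ((pvSplitTabs (l.takeWhile (fun c => c ≠ '\n'))).headD []).length) := by
  induction l generalizing w with
  | nil => simp [pvGoA, pvSplitTabs, pvFoldPieces]
  | cons c rest ih =>
    by_cases ht : c = '\t'
    · subst ht
      obtain ⟨h0, r', hr'⟩ : ∃ h0 r',
          pvSplitTabs (rest.takeWhile (fun c => decide (c ≠ '\n'))) = h0 :: r' := by
        cases h : pvSplitTabs (rest.takeWhile (fun c => decide (c ≠ '\n'))) with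
        | nil => exact absurd h (pvSplitTabs_ne_nil _)
        | cons a b => exact ⟨a, b, rfl⟩
      have hstep : pvGoA t ('\t' :: rest) w
          = pvGoA t rest (w + (|t| - PySem.Int.mod w |t|)) := by simp [pvGoA]
      have h1 : ('\t' :: rest).takeWhile (fun c => decide (c ≠ '\n'))
          = '\t' :: rest.takeWhile (fun c => decide (c ≠ '\n')) := by simp
      rw [hstep, ih, h1,
        show pvSplitTabs ('\t' :: rest.takeWhile (fun c => decide (c ≠ '\n')))
            = [] :: pvSplitTabs (rest.takeWhile (fun c => decide (c ≠ '\n'))) from by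
          simp [pvSplitTabs],
        hr']
      simp only [pvFoldPieces, List.headD, List.tail, List.foldl]
      congr 1
      simp only [List.length_nil, Nat.cast_zero, add_zero]
    · by_cases hn : c = '\n'
      · subst hn
        simp [pvGoA, pvSplitTabs, pvFoldPieces, ht]
      · obtain ⟨h0, r', hr'⟩ : ∃ h0 r',
            pvSplitTabs (rest.takeWhile (fun c => decide (c ≠ '\n'))) = h0 :: r' := by
          cases h : pvSplitTabs (rest.takeWhile (fun c => decide (c ≠ '\n'))) with
          | nil => exact absurd h (pvSplitTabs_ne_nil _)
          | cons a b => exact ⟨a, b, rfl⟩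
        have hstep : pvGoA t (c :: rest) w = pvGoA t rest (w + 1) := by
          simp [pvGoA, ht, hn]
        have h1 : (c :: rest).takeWhile (fun c => decide (c ≠ '\n'))
            = c :: rest.takeWhile (fun c => decide (c ≠ '\n')) := by simp [hn]
        rw [hstep, ih, h1,
          show pvSplitTabs (c :: rest.takeWhile (fun c => decide (c ≠ '\n')))
              = (c :: (pvSplitTabs (rest.takeWhile (fun c => decide (c ≠ '\n')))).headD [])
                :: (pvSplitTabs (rest.takeWhile (fun c => decide (c ≠ '\n')))).tail from by
            simp [pvSplitTabs, ht],
          hr']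
        simp only [pvFoldPieces, List.headD, List.tail]
        congr 1
        simp only [List.length_cons, Nat.cast_add, Nat.cast_one]
        ring

-- ===== VERDICT (by name: the statement is the Claim_ definition above) =====
theorem computeWidth_spec : Claim_equal_computeWidth := by
  intro s t _ _
  unfold Spec_computeWidth computeWidth computeWidth_alt
  rw [pvGoA_eq]
  simp
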